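-- pv_equiv track=rewrite | github.com/KatrinKroin/DES-3Loop-Attack | src/DES_Attack.py | ReverseS8
-- ===== SOURCE A (Python) =====
-- def ReverseS8(bits):
--     s=[[13, 2, 8, 4, 6, 15, 11, 1, 10, 9, 3, 14, 5, 0, 12, 7],
--          [1, 15, 13, 8, 10, 3, 7, 4, 12, 5, 6, 11, 0, 14, 9, 2],
--          [7, 11, 4, 1, 9, 12, 14, 2, 0, 6, 10, 13, 15, 3, 5, 8],
--          [2, 1, 14, 7, 4, 10, 8, 13, 15, 12, 9, 0, 3, 5, 6, 11]]
--
--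
--
--     key=[]
--     i=0
--     while i<6:
--         key+='x'
--         i+=1
--     if 'x' in bits:
--         return key
--     num=int(bits,2)
--
--     options=[]
--     k=0
--     q=0
--     for i in s:
--         for j in i:
--             if j==num:
--                 row=(bin(k)[2:].zfill(2))
--                 colomn=(bin(q)[2:].zfill(4))
--                 temp=''
--                 temp=[row[0]+colomn[0:4]+row[1]]
--                 options+=temp
--             q+=1
--         k+=1
--         q=0
--
--     i=0
--     while i<6 :
--         if options[0][i]==options[1][i] and options[0][i]==options[2][i] and options[0][i]==options[3][i]:
--             key[i]=options[0][i]
--         i+=1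
--
--     return key
-- ===== SOURCE B (Python) =====
-- def ReverseS8(bits):
--     s = [[13, 2, 8, 4, 6, 15, 11, 1, 10, 9, 3, 14, 5, 0, 12, 7],
--          [1, 15, 13, 8, 10, 3, 7, 4, 12, 5, 6, 11, 0, 14, 9, 2],
--          [7, 11, 4, 1, 9, 12, 14, 2, 0, 6, 10, 13, 15, 3, 5, 8],
--          [2, 1, 14, 7, 4, 10, 8, 13, 15, 12, 9, 0, 3, 5, 6, 11]]
--     key = ['x'] * 6
--     if 'x' in bits:
--         return key
--     num = int(bits, 2)
--     # inverse index: value -> its column in each of the 4 rows, built in one flat pass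
--     inv = {}
--     for i, v in enumerate(s[0] + s[1] + s[2] + s[3]):
--         inv.setdefault(v, []).append(i % 16)
--     c0, c1, c2, c3 = inv[num]
--     # a column bit is determined iff the four columns agree on it: XOR disagreement mask.
--     # The two row bits (positions 0 and 5) are never determined: the rows realise all
--     # four row-bit combinations, so they always disagree and stay 'x'.
--     mask = (c0 ^ c1) | (c0 ^ c2) | (c0 ^ c3)
--     for b in range(4):
--         if not (mask >> (3 - b)) & 1:
--             key[1 + b] = str((c0 >> (3 - b)) & 1)
--     return key
-- ===== Notes on version B (the rewrite author's own statement) =====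
-- stated objective: alternative
-- what changed: Replaced A's nested table scan building per-row 6-char candidate strings and a mutating 4-way character-comparison loop by a one-flat-pass inverse index (value -> list of columns) and integer XOR/OR disagreement-mask bit arithmetic; the always-undetermined row-bit positions 0 and 5 are never computed.
import Mathlib
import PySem

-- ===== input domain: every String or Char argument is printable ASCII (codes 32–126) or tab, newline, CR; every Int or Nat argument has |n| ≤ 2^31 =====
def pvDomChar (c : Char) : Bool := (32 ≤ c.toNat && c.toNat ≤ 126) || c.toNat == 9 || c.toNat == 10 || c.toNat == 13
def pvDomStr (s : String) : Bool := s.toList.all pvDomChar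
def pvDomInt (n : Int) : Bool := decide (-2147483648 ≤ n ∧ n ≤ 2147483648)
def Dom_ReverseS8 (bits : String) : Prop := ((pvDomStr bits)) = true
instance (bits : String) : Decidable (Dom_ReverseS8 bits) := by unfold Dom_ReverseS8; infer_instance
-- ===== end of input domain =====

-- B replaces A's nested candidate-string scan + 4-way comparison loop by a flat-pass inverse
-- index (value -> columns) and an XOR disagreement mask over the column bits (objective: simpler).

-- bin(n)[2:] for n ≥ 0 and zfill padding (used by port A's string candidates)
def pvBin (n : Nat) : List Char := Nat.toDigits 2 n
def pvZfill (w : Nat) (l : List Char) : List Char := List.replicate (w - l.length) '0' ++ l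

-- ===== PORT A =====
-- the table scan and key-patching loop of A, after num = int(bits, 2)
def ReverseS8_core (num : Int) : List String :=
  let s : List (List Int) :=
    [[13, 2, 8, 4, 6, 15, 11, 1, 10, 9, 3, 14, 5, 0, 12, 7],
     [1, 15, 13, 8, 10, 3, 7, 4, 12, 5, 6, 11, 0, 14, 9, 2],
     [7, 11, 4, 1, 9, 12, 14, 2, 0, 6, 10, 13, 15, 3, 5, 8],
     [2, 1, 14, 7, 4, 10, 8, 13, 15, 12, 9, 0, 3, 5, 6, 11]]
  -- 'for i in s: for j in i: if j==num: options += [row[0]+colomn[0:4]+row[1]]' with counters k, q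
  let options : List (List Char) :=
    (PySem.List.enumerate s).foldl (fun opts kr =>
      (PySem.List.enumerate kr.2).foldl (fun opts qj =>
        if qj.2 = num then
          let row := pvZfill 2 (pvBin kr.1.toNat)
          let colomn := pvZfill 4 (pvBin qj.1.toNat)
          opts ++ [[row.getD 0 ' '] ++ colomn ++ [row.getD 1 ' ']]
        else opts) opts) []
  -- Python indexes options[0]..options[3]; fewer than 4 options (only reachable as 0, when
  -- num ∉ [0,15]) is an IndexError, excluded by Pre_; string indexing is total here (length 6, i < 6)
  match options with
  | o0 :: o1 :: o2 :: o3 :: _ =>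
    (List.range 6).foldl (fun key i =>
      if o0.getD i ' ' = o1.getD i ' ' ∧ o0.getD i ' ' = o2.getD i ' ' ∧ o0.getD i ' ' = o3.getD i ' '
      then key.set i (String.ofList [o0.getD i ' ']) else key)
      ((List.range 6).foldl (fun k _ => k ++ ["x"]) [])
  | _ => []

def ReverseS8 (bits : String) : List String :=
  -- key = []; while i<6: key += 'x'
  let key := (List.range 6).foldl (fun k _ => k ++ ["x"]) []
  if 'x' ∈ bits.toList then key
  else
    match PySem.Int.ofStrBase? bits 2 with
    | none => []   -- int(bits, 2) raises ValueError; excluded by Pre_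
    | some num => ReverseS8_core num

-- ===== PORT B =====
def ReverseS8_alt_core (num : Int) : List String :=
  let s : List (List Int) :=
    [[13, 2, 8, 4, 6, 15, 11, 1, 10, 9, 3, 14, 5, 0, 12, 7],
     [1, 15, 13, 8, 10, 3, 7, 4, 12, 5, 6, 11, 0, 14, 9, 2],
     [7, 11, 4, 1, 9, 12, 14, 2, 0, 6, 10, 13, 15, 3, 5, 8],
     [2, 1, 14, 7, 4, 10, 8, 13, 15, 12, 9, 0, 3, 5, 6, 11]]
  -- for i, v in enumerate(s[0]+s[1]+s[2]+s[3]): inv.setdefault(v, []).append(i % 16)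
  let flat : List Int := (s.getD 0 []) ++ (s.getD 1 []) ++ (s.getD 2 []) ++ (s.getD 3 [])
  let inv : PySem.Dict Int (List Int) :=
    (PySem.List.enumerate flat).foldl (fun d iv =>
      PySem.Dict.insert d iv.2 (PySem.Dict.getD d iv.2 [] ++ [PySem.Int.mod iv.1 16]))
      PySem.Dict.empty
  -- c0, c1, c2, c3 = inv[num]: KeyError / unpacking ValueError otherwise, excluded by Pre_
  match PySem.Dict.getD inv num [] with
  | [c0, c1, c2, c3] =>
    let mask := PySem.Int.bor (PySem.Int.bor (PySem.Int.bxor c0 c1) (PySem.Int.bxor c0 c2))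
                  (PySem.Int.bxor c0 c3)
    (List.range 4).foldl (fun key (b : Nat) =>
      if PySem.Int.band (mask >>> (3 - b)) 1 = 0 then
        key.set (1 + b) (PySem.Int.toStr (PySem.Int.band (c0 >>> (3 - b)) 1))
      else key) (List.replicate 6 "x")
  | _ => []

def ReverseS8_alt (bits : String) : List String :=
  if 'x' ∈ bits.toList then List.replicate 6 "x"
  else
    match PySem.Int.ofStrBase? bits 2 with
    | none => []   -- int(bits, 2) raises ValueError; excluded by Pre_
    | some num => ReverseS8_alt_core num

-- ===== PRECONDITION & SPEC =====
-- exactly the inputs on which A returns: 'x' in bits (early return), or int(bits, 2) parses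
-- (else ValueError) to a value in [0, 15] (else options is empty and options[0] is IndexError)
def Pre_ReverseS8 (bits : String) : Prop :=
  'x' ∈ bits.toList ∨
    (PySem.Int.ofStrBase? bits 2).any (fun n => decide (0 ≤ n ∧ n ≤ 15)) = true
instance (bits : String) : Decidable (Pre_ReverseS8 bits) := by
  unfold Pre_ReverseS8; infer_instance

def pvWitness_ReverseS8 : String := "101"

def Spec_ReverseS8 (bits : String) (out : List String) : Prop := out = ReverseS8_alt bits
instance (bits : String) (out : List String) : Decidable (Spec_ReverseS8 bits out) := by unfold Spec_ReverseS8; infer_instance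

-- ===== CLAIM (what is proved, stated in full; the proofs are below) =====
def Claim_equal_ReverseS8 : Prop := ∀ (bits : String), Dom_ReverseS8 bits → Pre_ReverseS8 bits → Spec_ReverseS8 bits (ReverseS8 bits)

-- ===== LEMMAS AND PROOFS =====

set_option maxRecDepth 10000 in
theorem coreEq (n : Int) (h0 : 0 ≤ n) (h1 : n ≤ 15) : ReverseS8_core n = ReverseS8_alt_core n := by
  interval_cases n <;> decide

-- ===== VERDICT (by name: the statement is the Claim_ definition above) =====
theorem ReverseS8_spec : Claim_equal_ReverseS8 := by
  intro bits _ hpre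
  unfold Spec_ReverseS8 ReverseS8 ReverseS8_alt
  by_cases hx : 'x' ∈ bits.toList
  · simp only [hx, if_pos]
    decide
  · simp only [hx, if_false]
    rcases hpre with h | h
    · exact absurd h hx
    · cases hp : PySem.Int.ofStrBase? bits 2 with
      | none => rfl
      | some n =>
        rw [hp] at h
        simp [Option.any] at h
        exact coreEq n h.1 h.2
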